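-- pv_equiv track=rewrite | github.com/Academic-Affiliation/LOTL-Attack-Detection-Research | advanced_lotl_generator.py | determine_privilege_level
-- ===== SOURCE A (Python) =====
-- def determine_privilege_level(command):
--     """Determine required privilege level"""
--     cmd_lower = command.lower()
--
--     high_priv_indicators = [
--         'ntdsutil', 'vssadmin', 'bcdedit', 'wevtutil', 'schtasks',
--         '/create', 'administrator', 'system', 'reg add', 'net user'
--     ]
--
--     medium_priv_indicators = [
--         'wmic', 'netsh', 'regsvr32', 'certutil', 'bitsadmin'
--     ]
--
--     if any(indicator in cmd_lower for indicator in high_priv_indicators):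
--         return 'high'
--     elif any(indicator in cmd_lower for indicator in medium_priv_indicators):
--         return 'medium'
--     else:
--         return 'user'
-- ===== SOURCE B (Python) =====
-- def determine_privilege_level(command):
--     """Determine required privilege level"""
--     table = [
--         ('ntdsutil', 2), ('vssadmin', 2), ('bcdedit', 2), ('wevtutil', 2),
--         ('schtasks', 2), ('/create', 2), ('administrator', 2), ('system', 2),
--         ('reg add', 2), ('net user', 2),
--         ('wmic', 1), ('netsh', 1), ('regsvr32', 1), ('certutil', 1),
--         ('bitsadmin', 1),
--     ]
--     cmd_lower = command.lower()
--     level = 0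
--     for sub, pri in table:
--         if sub in cmd_lower:
--             level = max(level, pri)
--     if level == 2:
--         return 'high'
--     if level == 1:
--         return 'medium'
--     return 'user'
-- ===== Notes on version B (the rewrite author's own statement) =====
-- stated objective: alternative
-- what changed: Replaces the two ordered any() short-circuit checks with a single priority table (substring, 2/1) scanned once while accumulating the maximum matched priority, which is then mapped back to a label.
import Mathlib
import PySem

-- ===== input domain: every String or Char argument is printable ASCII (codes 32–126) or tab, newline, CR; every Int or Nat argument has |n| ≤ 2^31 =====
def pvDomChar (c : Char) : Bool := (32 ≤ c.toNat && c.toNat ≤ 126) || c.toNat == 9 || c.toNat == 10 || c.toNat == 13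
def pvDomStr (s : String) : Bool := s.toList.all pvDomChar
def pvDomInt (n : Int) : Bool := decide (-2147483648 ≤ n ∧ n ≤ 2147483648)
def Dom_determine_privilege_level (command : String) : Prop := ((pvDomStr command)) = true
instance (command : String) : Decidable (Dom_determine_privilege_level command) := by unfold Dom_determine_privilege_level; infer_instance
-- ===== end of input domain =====

-- B replaces A's two ordered any() checks by one pass over a priority table accumulating the max matched priority (alternative decomposition, same behaviour).

-- ===== PORT A =====
def determine_privilege_level (command : String) : String :=
  let cmd_lower := PySem.Str.lower command
  let high_priv_indicators : List String :=
    ["ntdsutil", "vssadmin", "bcdedit", "wevtutil", "schtasks",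
     "/create", "administrator", "system", "reg add", "net user"]
  let medium_priv_indicators : List String :=
    ["wmic", "netsh", "regsvr32", "certutil", "bitsadmin"]
  if high_priv_indicators.any (fun indicator => PySem.Str.isIn indicator cmd_lower) then
    "high"
  else if medium_priv_indicators.any (fun indicator => PySem.Str.isIn indicator cmd_lower) then
    "medium"
  else
    "user"

-- ===== PORT B =====
def determine_privilege_level_alt (command : String) : String :=
  let table : List (String × Nat) :=
    [("ntdsutil", 2), ("vssadmin", 2), ("bcdedit", 2), ("wevtutil", 2),
     ("schtasks", 2), ("/create", 2), ("administrator", 2), ("system", 2),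
     ("reg add", 2), ("net user", 2),
     ("wmic", 1), ("netsh", 1), ("regsvr32", 1), ("certutil", 1),
     ("bitsadmin", 1)]
  let cmd_lower := PySem.Str.lower command
  let level : Nat := table.foldl
    (fun level p => if PySem.Str.isIn p.1 cmd_lower then max level p.2 else level) 0
  if level = 2 then "high"
  else if level = 1 then "medium"
  else "user"

-- ===== PRECONDITION & SPEC =====
def Spec_determine_privilege_level (command : String) (out : String) : Prop := out = determine_privilege_level_alt command
instance (command : String) (out : String) : Decidable (Spec_determine_privilege_level command out) := by unfold Spec_determine_privilege_level; infer_instance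

-- ===== CLAIM (what is proved, stated in full; the proofs are below) =====
def Claim_equal_determine_privilege_level : Prop := ∀ (command : String), Dom_determine_privilege_level command → Spec_determine_privilege_level command (determine_privilege_level command)

-- ===== LEMMAS AND PROOFS =====

-- folding max over a table whose priorities are all k is an any-check
theorem foldl_const_pri (cmd : String) (k : Nat) (t : List (String × Nat))
    (h : ∀ p ∈ t, p.2 = k) (a : Nat) :
    t.foldl (fun level p => if PySem.Str.isIn p.1 cmd then max level p.2 else level) a
      = if t.any (fun p => PySem.Str.isIn p.1 cmd) then max a k else a := by
  induction t generalizing a with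
  | nil => simp
  | cons p t ih =>
    have hp : p.2 = k := h p (by simp)
    have ht : ∀ q ∈ t, q.2 = k := fun q hq => h q (by simp [hq])
    simp only [List.foldl_cons, List.any_cons]
    rw [ih ht, hp]
    by_cases hb : PySem.Str.isIn p.1 cmd = true
    · rw [if_pos hb, if_pos (show (PySem.Str.isIn p.1 cmd
          || t.any fun p => PySem.Str.isIn p.1 cmd) = true by rw [Bool.or_eq_true]; exact Or.inl hb)]
      by_cases hc : (t.any fun p => PySem.Str.isIn p.1 cmd) = true
      · rw [if_pos hc]; omega
      · rw [if_neg hc]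
    · rw [if_neg hb]
      have hb' : PySem.Str.isIn p.1 cmd = false := by simpa using hb
      by_cases hc : (t.any fun p => PySem.Str.isIn p.1 cmd) = true
      · rw [if_pos hc, if_pos (show (PySem.Str.isIn p.1 cmd
            || t.any fun p => PySem.Str.isIn p.1 cmd) = true by rw [Bool.or_eq_true]; exact Or.inr hc)]
      · rw [if_neg hc, if_neg (show ¬ (PySem.Str.isIn p.1 cmd
            || t.any fun p => PySem.Str.isIn p.1 cmd) = true by rw [Bool.or_eq_true]; exact fun h => h.elim hb hc)]

-- ===== VERDICT (by name: the statement is the Claim_ definition above) =====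
theorem determine_privilege_level_spec : Claim_equal_determine_privilege_level := by
  intro command _
  unfold Spec_determine_privilege_level determine_privilege_level determine_privilege_level_alt
  have htab : ([("ntdsutil", 2), ("vssadmin", 2), ("bcdedit", 2), ("wevtutil", 2),
     ("schtasks", 2), ("/create", 2), ("administrator", 2), ("system", 2),
     ("reg add", 2), ("net user", 2),
     ("wmic", 1), ("netsh", 1), ("regsvr32", 1), ("certutil", 1),
     ("bitsadmin", 1)] : List (String × Nat))
    = [("ntdsutil", 2), ("vssadmin", 2), ("bcdedit", 2), ("wevtutil", 2),
       ("schtasks", 2), ("/create", 2), ("administrator", 2), ("system", 2),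
       ("reg add", 2), ("net user", 2)]
      ++ [("wmic", 1), ("netsh", 1), ("regsvr32", 1), ("certutil", 1), ("bitsadmin", 1)] := rfl
  simp only [htab, List.foldl_append]
  rw [foldl_const_pri (PySem.Str.lower command) 1
        [("wmic", 1), ("netsh", 1), ("regsvr32", 1), ("certutil", 1), ("bitsadmin", 1)]
        (by decide),
      foldl_const_pri (PySem.Str.lower command) 2
        [("ntdsutil", 2), ("vssadmin", 2), ("bcdedit", 2), ("wevtutil", 2),
         ("schtasks", 2), ("/create", 2), ("administrator", 2), ("system", 2),
         ("reg add", 2), ("net user", 2)]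
        (by decide)]
  have hH : (([("ntdsutil", (2:Nat)), ("vssadmin", 2), ("bcdedit", 2), ("wevtutil", 2),
       ("schtasks", 2), ("/create", 2), ("administrator", 2), ("system", 2),
       ("reg add", 2), ("net user", 2)] : List (String × Nat)).any
        (fun p => PySem.Str.isIn p.1 (PySem.Str.lower command)))
      = (["ntdsutil", "vssadmin", "bcdedit", "wevtutil", "schtasks",
          "/create", "administrator", "system", "reg add", "net user"].any
        (fun indicator => PySem.Str.isIn indicator (PySem.Str.lower command))) := rfl
  have hM : (([("wmic", (1:Nat)), ("netsh", 1), ("regsvr32", 1), ("certutil", 1),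
       ("bitsadmin", 1)] : List (String × Nat)).any
        (fun p => PySem.Str.isIn p.1 (PySem.Str.lower command)))
      = (["wmic", "netsh", "regsvr32", "certutil", "bitsadmin"].any
        (fun indicator => PySem.Str.isIn indicator (PySem.Str.lower command))) := rfl
  rw [hH, hM]
  by_cases h1 : (["ntdsutil", "vssadmin", "bcdedit", "wevtutil", "schtasks",
          "/create", "administrator", "system", "reg add", "net user"].any
        (fun indicator => PySem.Str.isIn indicator (PySem.Str.lower command))) = true <;>
  by_cases h2 : (["wmic", "netsh", "regsvr32", "certutil", "bitsadmin"].any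
        (fun indicator => PySem.Str.isIn indicator (PySem.Str.lower command))) = true
  · rw [if_pos h1, if_pos h1, if_pos h2]; decide
  · rw [if_pos h1, if_pos h1, if_neg h2]; decide
  · rw [if_neg h1, if_neg h1, if_pos h2, if_pos h2]; decide
  · rw [if_neg h1, if_neg h1, if_neg h2, if_neg h2]; decide
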